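-- pv_equiv track=rewrite | github.com/ngocuong0105/usaco | silver/bcount.py | solve
-- ===== SOURCE A (Python) =====
-- from itertools import accumulate
-- from typing import Any
--
-- def query(l,r,cum):
--     return cum[r] - cum[l-1]
--
-- def pref(nums,i):
--     nums = [num==i for num in nums]
--     return [0] + list(accumulate(nums))
--
-- def solve(inp) -> Any:
--     nums,q = inp
--     res,mp = [],{}
--     for i in range(1,4):
--         mp[i] = pref(nums,i)
--     for l,r in q:
--         vals = [0,0,0]
--         for i in range(1,4):
--             vals[i-1] = str(query(l,r,mp[i]))
--         res.append(' '.join(vals))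
--     return res
-- ===== SOURCE B (Python) =====
-- def solve(inp):
--     nums, q = inp
--     n = len(nums)
--     # offline sweep: bucket each query boundary as a signed event at its position,
--     # then one left-to-right pass settles all events with the running counts
--     events = [[] for _ in range(n + 1)]
--     for qi, (l, r) in enumerate(q):
--         events[r].append((qi, 1))
--         events[l - 1].append((qi, -1))
--     ans = [(0, 0, 0)] * len(q)
--     c = (0, 0, 0)
--     for k in range(n + 1):
--         for qi, s in events[k]:
--             a = ans[qi]
--             ans[qi] = (a[0] + s * c[0], a[1] + s * c[1], a[2] + s * c[2])
--         if k < n: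
--             x = nums[k]
--             if x == 1:
--                 c = (c[0] + 1, c[1], c[2])
--             elif x == 2:
--                 c = (c[0], c[1] + 1, c[2])
--             elif x == 3:
--                 c = (c[0], c[1], c[2] + 1)
--     return [' '.join((str(u), str(v), str(w))) for (u, v, w) in ans]
-- ===== Notes on version B (the rewrite author's own statement) =====
-- stated objective: alternative
-- what changed: Replaces A's precomputed prefix-sum arrays (dict of three accumulate passes, O(1) lookup per query) by an offline event sweep: each query is split into two signed boundary events bucketed by position, and a single left-to-right pass over nums settles every event against the running counts, so no prefix table ever exists.
import Mathlib
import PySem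

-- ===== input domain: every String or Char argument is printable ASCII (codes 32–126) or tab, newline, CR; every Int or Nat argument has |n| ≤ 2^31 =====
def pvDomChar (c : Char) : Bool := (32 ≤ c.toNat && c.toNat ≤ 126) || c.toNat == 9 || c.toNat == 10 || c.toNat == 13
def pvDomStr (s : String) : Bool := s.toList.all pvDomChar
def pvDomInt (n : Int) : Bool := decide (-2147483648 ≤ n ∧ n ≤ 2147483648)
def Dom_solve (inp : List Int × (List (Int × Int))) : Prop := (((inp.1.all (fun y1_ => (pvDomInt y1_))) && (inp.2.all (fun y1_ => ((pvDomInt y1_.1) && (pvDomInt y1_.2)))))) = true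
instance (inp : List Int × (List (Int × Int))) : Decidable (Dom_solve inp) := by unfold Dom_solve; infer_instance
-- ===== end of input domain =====

-- B replaces A's precomputed prefix-sum arrays by an offline event sweep (two signed
-- boundary events per query, settled in one pass with running counts); objective: alternative.

-- ===== PORT A =====
-- itertools.accumulate with running sum s (Python bools count as 0/1, mapped to Int here)
def pvAccumulate (s : Int) : List Int → List Int
  | [] => []
  | x :: xs => (s + x) :: pvAccumulate (s + x) xs

def pref (nums : List Int) (i : Int) : List Int :=
  0 :: pvAccumulate 0 (nums.map (fun num => if num = i then (1 : Int) else 0))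

-- cum[r] - cum[l-1]; pyGetD is exact under Pre_solve (both indices in range)
def query (l r : Int) (cum : List Int) : Int :=
  PySem.List.pyGetD cum r 0 - PySem.List.pyGetD cum (l - 1) 0

def solve (inp : List Int × (List (Int × Int))) : List String :=
  let nums := inp.1
  let q := inp.2
  let mp : PySem.Dict Int (List Int) :=
    (PySem.List.pyRange 1 4 1).foldl (fun mp i => mp.insert i (pref nums i)) (PySem.Dict.mk [])
  q.foldl (fun res lr =>
    -- Python's vals starts as ints [0,0,0] and every slot is overwritten by a str in the
    -- loop below; ported as ["0","0","0"] : List String (identical final value).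
    let vals : List String :=
      (PySem.List.pyRange 1 4 1).foldl (fun vals i =>
        -- mp[i]: keys 1,2,3 are always present, getD default never read
        PySem.List.pySetD vals (i - 1)
          (PySem.Int.toStr (query lr.1 lr.2 (mp.getD i [])))) ["0", "0", "0"]
    res ++ [PySem.Str.join " " vals]) []

-- ===== PORT B =====
def solve_alt (inp : List Int × (List (Int × Int))) : List String :=
  let nums := inp.1
  let q := inp.2
  let n : Int := nums.length
  -- events = [[] for _ in range(n+1)]
  let events0 : List (List (Int × Int)) := (PySem.List.pyRange 0 (n + 1) 1).map (fun _ => [])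
  -- events[r].append((qi, 1)); events[l-1].append((qi, -1))  (pyGetD/pySetD exact under Pre_solve)
  let events := (PySem.List.enumerate q 0).foldl (fun ev p =>
      let ev := PySem.List.pySetD ev p.2.2 (PySem.List.pyGetD ev p.2.2 [] ++ [(p.1, (1 : Int))])
      PySem.List.pySetD ev (p.2.1 - 1) (PySem.List.pyGetD ev (p.2.1 - 1) [] ++ [(p.1, (-1 : Int))]))
    events0
  -- ans = [(0,0,0)] * len(q)
  let ans0 : List (Int × Int × Int) := PySem.List.pyRepeat [((0 : Int), (0 : Int), (0 : Int))] (q.length : Int)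
  let st := (PySem.List.pyRange 0 (n + 1) 1).foldl
    (fun (st : (Int × Int × Int) × List (Int × Int × Int)) k =>
      let c := st.1
      let ans := (PySem.List.pyGetD events k []).foldl (fun ans e =>
          let a := PySem.List.pyGetD ans e.1 (0, 0, 0)
          PySem.List.pySetD ans e.1 (a.1 + e.2 * c.1, a.2.1 + e.2 * c.2.1, a.2.2 + e.2 * c.2.2)) st.2
      if k < n then
        let x := PySem.List.pyGetD nums k 0
        let c := if x = 1 then (c.1 + 1, c.2.1, c.2.2)
          else if x = 2 then (c.1, c.2.1 + 1, c.2.2)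
          else if x = 3 then (c.1, c.2.1, c.2.2 + 1)
          else c
        (c, ans)
      else (c, ans)) ((0, 0, 0), ans0)
  st.2.map (fun a => PySem.Str.join " " [PySem.Int.toStr a.1, PySem.Int.toStr a.2.1, PySem.Int.toStr a.2.2])

-- ===== PRECONDITION & SPEC =====
-- Pre_ excludes exactly the queries on which A raises IndexError: each (l,r) must index the
-- prefix table of length len(nums)+1 (Python negative-index semantics included).
def Pre_solve (inp : List Int × (List (Int × Int))) : Prop :=
  ∀ lr ∈ inp.2, PySem.Raise.InRange (inp.1.length + 1) lr.2 ∧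
    PySem.Raise.InRange (inp.1.length + 1) (lr.1 - 1)
instance (inp : List Int × (List (Int × Int))) : Decidable (Pre_solve inp) := by
  unfold Pre_solve; infer_instance
def pvWitness_solve : (List Int × (List (Int × Int))) := ([1, 3, 2, 1], [(1, 4), (2, 3), (0, -1)])
def Spec_solve (inp : List Int × (List (Int × Int))) (out : List String) : Prop := out = solve_alt inp
instance (inp : List Int × (List (Int × Int))) (out : List String) : Decidable (Spec_solve inp out) := by unfold Spec_solve; infer_instance

-- ===== CLAIM (what is proved, stated in full; the proofs are below) =====
def Claim_equal_solve : Prop := ∀ (inp : List Int × (List (Int × Int))), Dom_solve inp → Pre_solve inp → Spec_solve inp (solve inp)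

-- ===== LEMMAS AND PROOFS =====

set_option maxHeartbeats 1000000

-- running counts triple: pcStep bumps the slot of x ∈ {1,2,3}
def pcStep (c : Int × Int × Int) (x : Int) : Int × Int × Int :=
  if x = 1 then (c.1 + 1, c.2.1, c.2.2)
  else if x = 2 then (c.1, c.2.1 + 1, c.2.2)
  else if x = 3 then (c.1, c.2.1, c.2.2 + 1)
  else c

def tadd (a b : Int × Int × Int) : Int × Int × Int := (a.1 + b.1, a.2.1 + b.2.1, a.2.2 + b.2.2)

def smul (s : Int) (c : Int × Int × Int) : Int × Int × Int := (s * c.1, s * c.2.1, s * c.2.2)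

-- Python-index add: ans[i] += v
def addAt (ans : List (Int × Int × Int)) (i : Int) (v : Int × Int × Int) : List (Int × Int × Int) :=
  PySem.List.pySetD ans i (tadd (PySem.List.pyGetD ans i (0, 0, 0)) v)

-- Nat-index form of addAt
def addN (ans : List (Int × Int × Int)) (k : Nat) (v : Int × Int × Int) : List (Int × Int × Int) :=
  ans.set k (tadd (ans.getD k (0, 0, 0)) v)

-- settle one bucket of events against counts c
def applyB (c : Int × Int × Int) (ans : List (Int × Int × Int)) (b : List (Int × Int)) :
    List (Int × Int × Int) :=
  b.foldl (fun ans e => addAt ans e.1 (smul e.2 c)) ans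

-- one sweep step: settle the bucket, then bump the counts with the element
def G (st : (Int × Int × Int) × List (Int × Int × Int)) (p : List (Int × Int) × Int) :
    (Int × Int × Int) × List (Int × Int × Int) :=
  (pcStep st.1 p.2, applyB st.1 st.2 p.1)

-- events[i].append(e)
def insEv (ev : List (List (Int × Int))) (i : Int) (e : Int × Int) : List (List (Int × Int)) :=
  PySem.List.pySetD ev i (PySem.List.pyGetD ev i [] ++ [e])

def buildStep (ev : List (List (Int × Int))) (p : Int × Int × Int) : List (List (Int × Int)) :=
  insEv (insEv ev p.2.2 (p.1, 1)) (p.2.1 - 1) (p.1, -1)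

def buildEv (q : List (Int × Int)) (ev0 : List (List (Int × Int))) : List (List (Int × Int)) :=
  (PySem.List.enumerate q 0).foldl buildStep ev0

-- resolved (wrapped) Python index, as pyIdx? computes it
def resIdx (len : Nat) (i : Int) : Nat := if 0 ≤ i then i.toNat else len - (-i).toNat

-- counts among the first t elements
def pcAt (nums : List Int) (t : Nat) : Int × Int × Int := (nums.take t).foldl pcStep (0, 0, 0)

-- value B computes for one query
def resQ (nums : List Int) (lr : Int × Int) : Int × Int × Int :=
  tadd (tadd (0, 0, 0) (smul 1 (pcAt nums (resIdx (nums.length + 1) lr.2))))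
       (smul (-1) (pcAt nums (resIdx (nums.length + 1) (lr.1 - 1))))

theorem pyIdx?_inRange (len : Nat) (i : Int) (h : PySem.Raise.InRange len i) :
    PySem.List.pyIdx? len i = some (resIdx len i) := by
  obtain ⟨h1, h2⟩ := h
  simp only [PySem.List.pyIdx?, resIdx]
  by_cases ha : 0 ≤ i
  · simp [ha, h2]
  · simp [ha, h1]

theorem resIdx_lt (len : Nat) (i : Int) (h : PySem.Raise.InRange len i) : resIdx len i < len := by
  obtain ⟨h1, h2⟩ := h
  unfold resIdx
  split_ifs with ha <;> omega

theorem pyGetD_resolve {α : Type} (xs : List α) (i : Int) (d : α)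
    (h : PySem.Raise.InRange xs.length i) :
    PySem.List.pyGetD xs i d = xs.getD (resIdx xs.length i) d := by
  simp [PySem.List.pyGetD, PySem.List.pyGet?, pyIdx?_inRange _ _ h,
    List.getD_eq_getElem?_getD]

theorem pySetD_resolve {α : Type} (xs : List α) (i : Int) (v : α)
    (h : PySem.Raise.InRange xs.length i) :
    PySem.List.pySetD xs i v = xs.set (resIdx xs.length i) v := by
  simp [PySem.List.pySetD, PySem.List.pySet?, pyIdx?_inRange _ _ h]

theorem length_addN (ans : List (Int × Int × Int)) (k : Nat) (v : Int × Int × Int) :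
    (addN ans k v).length = ans.length := by simp [addN]

theorem addAt_natCast (ans : List (Int × Int × Int)) (k : Nat) (v : Int × Int × Int) :
    addAt ans (k : Int) v = addN ans k v := by
  simp [addAt, addN, PySem.List.pySetD_natCast, PySem.List.pyGetD_natCast]

theorem tadd_right_comm (a v w : Int × Int × Int) : tadd (tadd a v) w = tadd (tadd a w) v := by
  simp only [tadd, Prod.mk.injEq]
  omega

theorem getD_set_ne {α : Type} (l : List α) (i j : Nat) (v d : α) (hij : i ≠ j) :
    (l.set i v).getD j d = l.getD j d := by
  rcases Nat.lt_or_ge j l.length with hj | hj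
  · rw [List.getD_eq_getElem _ _ (by simpa using hj), List.getD_eq_getElem _ _ hj]
    exact List.getElem_set_ne hij _
  · rw [List.getD_eq_default _ _ (by simpa using hj), List.getD_eq_default _ _ hj]

theorem addN_comm (ans : List (Int × Int × Int)) (k m : Nat) (v w : Int × Int × Int) :
    addN (addN ans k v) m w = addN (addN ans m w) k v := by
  by_cases hkm : k = m
  · subst hkm
    by_cases hk : k < ans.length
    · have hg : ∀ y, (ans.set k y).getD k (0, 0, 0) = y := by
        intro y
        rw [List.getD_eq_getElem _ _ (by simpa using hk), List.getElem_set_self]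
      simp only [addN, hg, List.set_set]
      rw [tadd_right_comm]
    · have h1 : ∀ y, ans.set k y = ans := fun y => List.set_eq_of_length_le (Nat.le_of_not_lt hk)
      simp [addN, h1]
  · simp only [addN, getD_set_ne _ _ _ _ _ hkm, getD_set_ne _ _ _ _ _ (Ne.symm hkm)]
    rw [List.set_comm _ _ hkm]

theorem getD_append_left' {α : Type} (M L : List α) (k : Nat) (h : k < M.length) (d : α) :
    (M ++ L).getD k d = M.getD k d := by
  rw [List.getD_eq_getElem _ _ (by simp; omega), List.getD_eq_getElem _ _ h,
    List.getElem_append_left h]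

theorem set_append_left' {α : Type} (M L : List α) (k : Nat) (h : k < M.length) (y : α) :
    (M ++ L).set k y = M.set k y ++ L := by
  induction M generalizing k with
  | nil => simp at h
  | cons a M ih =>
    cases k with
    | zero => simp
    | succ k => simp only [List.cons_append, List.set_cons_succ]; rw [ih k (by simpa using h)]

theorem addN_append (ans : List (Int × Int × Int)) (w : Int × Int × Int) (k : Nat)
    (h : k < ans.length) (v : Int × Int × Int) :
    addN (ans ++ [w]) k v = addN ans k v ++ [w] := by
  rw [addN, addN, getD_append_left' _ _ _ h, set_append_left' _ _ _ h]

theorem getD_append_len {α : Type} (M : List α) (z : α) (d : α) :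
    (M ++ [z]).getD M.length d = z := by
  induction M with
  | nil => rfl
  | cons a M ih =>
    simp only [List.cons_append, List.length_cons, List.getD_cons_succ]
    exact ih

theorem set_append_len {α : Type} (M : List α) (z y : α) :
    (M ++ [z]).set M.length y = M ++ [y] := by
  induction M with
  | nil => rfl
  | cons a M ih => simp only [List.cons_append, List.length_cons, List.set_cons_succ]; rw [ih]

theorem addN_concat (M : List (Int × Int × Int)) (z v : Int × Int × Int) :
    addN (M ++ [z]) M.length v = M ++ [tadd z v] := by
  rw [addN, getD_append_len, set_append_len]

theorem applyB_addN (c : Int × Int × Int) (b : List (Int × Int))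
    (hb : ∀ e ∈ b, ∃ t : Nat, e.1 = (t : Int)) (ans : List (Int × Int × Int)) (k : Nat)
    (v : Int × Int × Int) :
    applyB c (addN ans k v) b = addN (applyB c ans b) k v := by
  induction b generalizing ans with
  | nil => rfl
  | cons e b ih =>
    obtain ⟨t, ht⟩ := hb e List.mem_cons_self
    simp only [applyB, List.foldl_cons] at *
    rw [ht, addAt_natCast, addAt_natCast, addN_comm]
    exact ih (fun e he => hb e (List.mem_cons_of_mem _ he)) _

theorem foldG_addN (zs : List (List (Int × Int) × Int))
    (hz : ∀ p ∈ zs, ∀ e ∈ p.1, ∃ t : Nat, e.1 = (t : Int)) (c : Int × Int × Int)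
    (ans : List (Int × Int × Int)) (k : Nat) (v : Int × Int × Int) :
    zs.foldl G (c, addN ans k v)
      = ((zs.foldl G (c, ans)).1, addN (zs.foldl G (c, ans)).2 k v) := by
  induction zs generalizing c ans with
  | nil => rfl
  | cons p zs ih =>
    simp only [List.foldl_cons]
    have h1 : G (c, addN ans k v) p = (pcStep c p.2, addN (applyB c ans p.1) k v) := by
      simp [G, applyB_addN c p.1 (hz p List.mem_cons_self) ans k v]
    rw [h1, ih (fun p hp => hz p (List.mem_cons_of_mem _ hp))]
    rfl

theorem length_applyB (c : Int × Int × Int) (ans : List (Int × Int × Int))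
    (b : List (Int × Int)) : (applyB c ans b).length = ans.length := by
  induction b generalizing ans with
  | nil => rfl
  | cons e b ih =>
    simp only [applyB, List.foldl_cons] at *
    rw [ih]; simp [addAt, PySem.List.length_pySetD]

theorem applyB_append_last (c : Int × Int × Int) (b : List (Int × Int))
    (ans : List (Int × Int × Int)) (w : Int × Int × Int)
    (hb : ∀ e ∈ b, ∃ t : Nat, e.1 = (t : Int) ∧ t < ans.length) :
    applyB c (ans ++ [w]) b = applyB c ans b ++ [w] := by
  induction b generalizing ans with
  | nil => rfl
  | cons e b ih =>
    obtain ⟨t, ht, hlt⟩ := hb e List.mem_cons_self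
    simp only [applyB, List.foldl_cons] at *
    rw [ht, addAt_natCast, addAt_natCast, addN_append _ _ _ hlt]
    apply ih
    intro e he
    obtain ⟨t', ht', hlt'⟩ := hb e (List.mem_cons_of_mem _ he)
    exact ⟨t', ht', by rwa [length_addN]⟩

theorem foldG_append_last (zs : List (List (Int × Int) × Int)) (ans : List (Int × Int × Int))
    (hz : ∀ p ∈ zs, ∀ e ∈ p.1, ∃ t : Nat, e.1 = (t : Int) ∧ t < ans.length)
    (c : Int × Int × Int) (w : Int × Int × Int) :
    zs.foldl G (c, ans ++ [w])
      = ((zs.foldl G (c, ans)).1, (zs.foldl G (c, ans)).2 ++ [w]) := by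
  induction zs generalizing c ans with
  | nil => rfl
  | cons p zs ih =>
    simp only [List.foldl_cons]
    have h1 : G (c, ans ++ [w]) p = (pcStep c p.2, applyB c ans p.1 ++ [w]) := by
      simp [G, applyB_append_last c p.1 ans w (hz p List.mem_cons_self)]
    rw [h1, ih _ (fun p' hp' e he => by
      obtain ⟨t, ht, hlt⟩ := hz p' (List.mem_cons_of_mem _ hp') e he
      exact ⟨t, ht, by rwa [length_applyB]⟩)]
    rfl

theorem foldG_set (evs : List (List (Int × Int))) (v : List Int) (t : Nat) (m : Nat) (s : Int)
    (hlen : evs.length = v.length) (ht : t < evs.length)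
    (hz : ∀ b ∈ evs, ∀ e ∈ b, ∃ j : Nat, e.1 = (j : Int)) (c : Int × Int × Int)
    (ans : List (Int × Int × Int)) :
    ((evs.set t (evs.getD t [] ++ [((m : Int), s)])).zip v).foldl G (c, ans)
      = (((evs.zip v).foldl G (c, ans)).1,
         addN ((evs.zip v).foldl G (c, ans)).2 m (smul s ((v.take t).foldl pcStep c))) := by
  induction evs generalizing v t c ans with
  | nil => simp at ht
  | cons b evs ih =>
    cases v with
    | nil => simp at hlen
    | cons x v =>
      cases t with
      | zero =>
        simp only [List.set_cons_zero, List.getD_cons_zero, List.zip_cons_cons,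
          List.foldl_cons, List.take_zero, List.foldl_nil]
        have h1 : G (c, ans) (b ++ [((m : Int), s)], x)
            = (pcStep c x, addN (applyB c ans b) m (smul s c)) := by
          simp only [G, applyB, List.foldl_append, List.foldl_cons, List.foldl_nil]
          rw [addAt_natCast]
        rw [h1,
          foldG_addN _ (fun p hp e he =>
            hz p.1 (List.mem_cons_of_mem _ (List.of_mem_zip hp).1) e he)]
        rfl
      | succ t =>
        simp only [List.set_cons_succ, List.getD_cons_succ, List.zip_cons_cons,
          List.foldl_cons, List.take_succ_cons]
        have h1 : G (c, ans) (b, x) = (pcStep c x, applyB c ans b) := rfl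
        rw [h1, ih v t (by simpa using hlen) (by simpa using ht)
          (fun b' hb' => hz b' (List.mem_cons_of_mem _ hb')) (pcStep c x) (applyB c ans b)]

theorem foldG_empty (zs : List (List (Int × Int) × Int))
    (h : ∀ p ∈ zs, p.1 = ([] : List (Int × Int))) (c : Int × Int × Int)
    (ans : List (Int × Int × Int)) : (zs.foldl G (c, ans)).2 = ans := by
  induction zs generalizing c ans with
  | nil => rfl
  | cons p zs ih =>
    simp only [List.foldl_cons]
    have h1 : G (c, ans) p = (pcStep c p.2, ans) := by
      have := h p List.mem_cons_self
      simp [G, this, applyB]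
    rw [h1]
    exact ih (fun p hp => h p (List.mem_cons_of_mem _ hp)) _ _

theorem buildEv_spec (nums : List Int) (q : List (Int × Int))
    (hq : ∀ lr ∈ q, PySem.Raise.InRange (nums.length + 1) lr.2 ∧
      PySem.Raise.InRange (nums.length + 1) (lr.1 - 1)) :
    (buildEv q (List.replicate (nums.length + 1) [])).length = nums.length + 1 ∧
    (∀ b ∈ buildEv q (List.replicate (nums.length + 1) []),
      ∀ e ∈ b, ∃ j : Nat, e.1 = (j : Int) ∧ j < q.length) ∧
    (((buildEv q (List.replicate (nums.length + 1) [])).zip (nums ++ [0])).foldl G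
        ((0, 0, 0), List.replicate q.length (0, 0, 0))).2
      = q.map (resQ nums) := by
  induction q using List.reverseRecOn with
  | nil =>
    refine ⟨by simp [buildEv, PySem.List.enumerate_nil], ?_, ?_⟩
    · intro b hb e he
      rw [buildEv, PySem.List.enumerate_nil, List.foldl_nil] at hb
      rw [List.eq_of_mem_replicate hb] at he
      exact absurd he (List.not_mem_nil)
    · rw [buildEv, PySem.List.enumerate_nil, List.foldl_nil]
      simp only [List.length_nil, List.replicate_zero, List.map_nil]
      exact foldG_empty _ (fun p hp => List.eq_of_mem_replicate (List.of_mem_zip hp).1) _ _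
  | append_singleton q lr ih =>
    obtain ⟨hlen, hmem, hfold⟩ := ih (fun x hx => hq x (List.mem_append_left _ hx))
    have h2 := (hq lr (by simp)).1
    have h1 := (hq lr (by simp)).2
    have hbuild : buildEv (q ++ [lr]) (List.replicate (nums.length + 1) [])
        = buildStep (buildEv q (List.replicate (nums.length + 1) [])) ((q.length : Int), lr) := by
      rw [buildEv, PySem.List.enumerate_append]
      simp [PySem.List.enumerate_cons, PySem.List.enumerate_nil, List.foldl_append, buildEv]
    set E := buildEv q (List.replicate (nums.length + 1) []) with hE_def
    set tr := resIdx (nums.length + 1) lr.2 with htr_def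
    set tl := resIdx (nums.length + 1) (lr.1 - 1) with htl_def
    have htr : tr < nums.length + 1 := resIdx_lt _ _ h2
    have htl : tl < nums.length + 1 := resIdx_lt _ _ h1
    have hE1 : insEv E lr.2 ((q.length : Int), 1)
        = E.set tr (E.getD tr [] ++ [((q.length : Int), 1)]) := by
      rw [insEv, pySetD_resolve _ _ _ (by rw [hlen]; exact h2),
        pyGetD_resolve _ _ _ (by rw [hlen]; exact h2), hlen]
    set E1 := E.set tr (E.getD tr [] ++ [((q.length : Int), 1)]) with hE1_def
    have hlen1 : E1.length = nums.length + 1 := by simp [hE1_def, hlen]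
    have hE2 : insEv E1 (lr.1 - 1) ((q.length : Int), -1)
        = E1.set tl (E1.getD tl [] ++ [((q.length : Int), -1)]) := by
      rw [insEv, pySetD_resolve _ _ _ (by rw [hlen1]; exact h1),
        pyGetD_resolve _ _ _ (by rw [hlen1]; exact h1), hlen1]
    have hstep : buildStep E ((q.length : Int), lr)
        = E1.set tl (E1.getD tl [] ++ [((q.length : Int), -1)]) := by
      rw [buildStep]; dsimp only; rw [hE1, hE2]
    have hmem1 : ∀ b ∈ E1, ∀ e ∈ b, ∃ j : Nat, e.1 = (j : Int) ∧ j < q.length + 1 := by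
      intro b hb e he
      rcases List.mem_or_eq_of_mem_set hb with hb' | rfl
      · obtain ⟨j, hj, hjl⟩ := hmem b hb' e he
        exact ⟨j, hj, by omega⟩
      · rcases List.mem_append.1 he with he' | he'
        · have hgd : E.getD tr [] = E[tr]'(by rw [hlen]; omega) :=
            List.getD_eq_getElem _ _ (by rw [hlen]; omega)
          rw [hgd] at he'
          obtain ⟨j, hj, hjl⟩ := hmem _ (List.getElem_mem _) e he'
          exact ⟨j, hj, by omega⟩
        · rw [List.mem_singleton.1 he']
          exact ⟨q.length, rfl, by omega⟩
    refine ⟨?_, ?_, ?_⟩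
    · rw [hbuild, hstep]; simp [hlen1]
    · rw [hbuild, hstep]
      intro b hb e he
      simp only [List.length_append, List.length_singleton]
      rcases List.mem_or_eq_of_mem_set hb with hb' | rfl
      · obtain ⟨j, hj, hjl⟩ := hmem1 b hb' e he
        exact ⟨j, hj, by omega⟩
      · rcases List.mem_append.1 he with he' | he'
        · have hgd : E1.getD tl [] = E1[tl]'(by rw [hlen1]; omega) :=
            List.getD_eq_getElem _ _ (by rw [hlen1]; omega)
          rw [hgd] at he'
          obtain ⟨j, hj, hjl⟩ := hmem1 _ (List.getElem_mem _) e he'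
          exact ⟨j, hj, by omega⟩
        · rw [List.mem_singleton.1 he']
          exact ⟨q.length, rfl, by omega⟩
    · rw [hbuild, hstep]
      have hzE : ∀ b ∈ E, ∀ e ∈ b, ∃ j : Nat, e.1 = (j : Int) :=
        fun b hb e he => (hmem b hb e he).imp (fun j hh => hh.1)
      have hzE1 : ∀ b ∈ E1, ∀ e ∈ b, ∃ j : Nat, e.1 = (j : Int) :=
        fun b hb e he => (hmem1 b hb e he).imp (fun j hh => hh.1)
      simp only [List.length_append, List.length_singleton]
      rw [foldG_set E1 (nums ++ [0]) tl q.length (-1) (by simp [hlen1]) (by rw [hlen1]; omega) hzE1]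
      rw [List.replicate_succ']
      rw [foldG_set E (nums ++ [0]) tr q.length 1 (by simp [hlen]) (by rw [hlen]; omega) hzE]
      rw [foldG_append_last _ _ (fun p hp e he => by
        obtain ⟨j, hj, hjl⟩ := hmem p.1 (List.of_mem_zip hp).1 e he
        exact ⟨j, hj, by simpa using hjl⟩)]
      rw [hfold]
      have htk1 : (nums ++ [0]).take tr = nums.take tr :=
        List.take_append_of_le_length (by omega)
      have htk2 : (nums ++ [0]).take tl = nums.take tl :=
        List.take_append_of_le_length (by omega)
      rw [htk1, htk2]
      have hmlen : q.length = (q.map (resQ nums)).length := by simp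
      rw [hmlen, addN_concat, addN_concat]
      rw [List.map_append, List.map_singleton]
      simp only [resQ, pcAt]
      rw [htr_def, htl_def]

theorem sweep_eq (events : List (List (Int × Int))) (nums : List Int)
    (h : events.length = nums.length + 1) (init : (Int × Int × Int) × List (Int × Int × Int)) :
    (PySem.List.pyRange 0 ((nums.length : Int) + 1) 1).foldl
      (fun st k =>
        if k < (nums.length : Int) then
          (if PySem.List.pyGetD nums k 0 = 1 then (st.1.1 + 1, st.1.2.1, st.1.2.2)
            else if PySem.List.pyGetD nums k 0 = 2 then (st.1.1, st.1.2.1 + 1, st.1.2.2)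
            else if PySem.List.pyGetD nums k 0 = 3 then (st.1.1, st.1.2.1, st.1.2.2 + 1)
            else st.1,
           (PySem.List.pyGetD events k []).foldl
             (fun ans e =>
               PySem.List.pySetD ans e.1
                 ((PySem.List.pyGetD ans e.1 (0, 0, 0)).1 + e.2 * st.1.1,
                  (PySem.List.pyGetD ans e.1 (0, 0, 0)).2.1 + e.2 * st.1.2.1,
                  (PySem.List.pyGetD ans e.1 (0, 0, 0)).2.2 + e.2 * st.1.2.2)) st.2)
        else
          (st.1,
           (PySem.List.pyGetD events k []).foldl
             (fun ans e =>
               PySem.List.pySetD ans e.1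
                 ((PySem.List.pyGetD ans e.1 (0, 0, 0)).1 + e.2 * st.1.1,
                  (PySem.List.pyGetD ans e.1 (0, 0, 0)).2.1 + e.2 * st.1.2.1,
                  (PySem.List.pyGetD ans e.1 (0, 0, 0)).2.2 + e.2 * st.1.2.2)) st.2)) init
    = (events.zip (nums ++ [0])).foldl G init := by
  have hlzs : (events.zip (nums ++ [0])).length = nums.length + 1 := by
    simp [List.length_zip, h]
  have hbnd : ((nums.length : Int) + 1) = ((events.zip (nums ++ [0])).length : Int) := by
    rw [hlzs]; push_cast; ring
  rw [hbnd, ← PySem.List.foldl_pyRange_zero_pyGetD' (events.zip (nums ++ [0])) ([], 0) G init]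
  apply PySem.List.foldl_congr_mem
  intro acc k hk
  rw [PySem.List.mem_pyRange_one] at hk
  obtain ⟨hk0, hk1⟩ := hk
  lift k to ℕ using hk0 with t
  have htz : t < (events.zip (nums ++ [0])).length := by exact_mod_cast hk1
  have ht : t < nums.length + 1 := by omega
  have hzs : PySem.List.pyGetD (events.zip (nums ++ [0])) (t : Int) ([], 0)
      = (events.getD t [], (nums ++ [0]).getD t 0) := by
    rw [PySem.List.pyGetD_natCast, List.getD_eq_getElem _ _ htz, List.getElem_zip,
      List.getD_eq_getElem _ _ (by omega), List.getD_eq_getElem _ _ (by simp; omega)]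
  rw [hzs, PySem.List.pyGetD_natCast events t []]
  by_cases hlt : ((t : Int) < (nums.length : Int))
  · have htn : t < nums.length := by exact_mod_cast hlt
    rw [if_pos hlt, PySem.List.pyGetD_natCast nums t 0]
    have hgx : (nums ++ [0])[t]? = nums[t]? := List.getElem?_append_left htn
    simp [G, applyB, addAt, tadd, smul, pcStep, hgx]
  · have htn : t = nums.length := by omega
    rw [if_neg hlt]
    subst htn
    have hgx : (nums ++ [0])[nums.length]? = some 0 := by
      rw [List.getElem?_append_right (le_refl _)]
      simp
    norm_num [G, applyB, addAt, tadd, smul, pcStep, hgx]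

theorem B_char (nums : List Int) (q : List (Int × Int)) (h : Pre_solve (nums, q)) :
    solve_alt (nums, q) = q.map (fun lr => PySem.Str.join " "
      [PySem.Int.toStr (resQ nums lr).1, PySem.Int.toStr (resQ nums lr).2.1,
       PySem.Int.toStr (resQ nums lr).2.2]) := by
  have hq : ∀ lr ∈ q, PySem.Raise.InRange (nums.length + 1) lr.2 ∧
      PySem.Raise.InRange (nums.length + 1) (lr.1 - 1) := h
  obtain ⟨hlen, hmem, hfold⟩ := buildEv_spec nums q hq
  simp only [solve_alt]
  have hev0 : (List.map (fun x => ([] : List (Int × Int)))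
      (PySem.List.pyRange 0 ((nums.length : Int) + 1) 1)) = List.replicate (nums.length + 1) [] := by
    rw [List.map_const']
    congr 1
    rw [PySem.List.length_pyRange_one]
    omega
  rw [hev0]
  have hbld : List.foldl
      (fun ev (p : Int × Int × Int) =>
        PySem.List.pySetD (PySem.List.pySetD ev p.2.2 (PySem.List.pyGetD ev p.2.2 [] ++ [(p.1, 1)]))
          (p.2.1 - 1)
          (PySem.List.pyGetD (PySem.List.pySetD ev p.2.2 (PySem.List.pyGetD ev p.2.2 [] ++ [(p.1, 1)]))
              (p.2.1 - 1) [] ++ [(p.1, -1)]))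
      (List.replicate (nums.length + 1) []) (PySem.List.enumerate q)
      = buildEv q (List.replicate (nums.length + 1) []) := rfl
  rw [hbld]
  rw [PySem.List.pyRepeat_singleton]
  rw [sweep_eq (buildEv q (List.replicate (nums.length + 1) [])) nums hlen]
  rw [show ((q.length : Int)).toNat = q.length from Int.toNat_natCast q.length]
  rw [hfold]
  simp [List.map_map, Function.comp]

-- ===== A side =====

theorem A_char (nums : List Int) (q : List (Int × Int)) :
    solve (nums, q) = q.map (fun lr => PySem.Str.join " "
      [PySem.Int.toStr (query lr.1 lr.2 (pref nums 1)),
       PySem.Int.toStr (query lr.1 lr.2 (pref nums 2)),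
       PySem.Int.toStr (query lr.1 lr.2 (pref nums 3))]) := by
  simp only [solve]
  have hrange : PySem.List.pyRange 1 4 1 = [1, 2, 3] := by decide
  simp only [hrange, List.foldl_cons, List.foldl_nil]
  rw [PySem.List.foldl_append_singleton_eq_map]
  simp only [List.nil_append]
  apply List.map_congr_left
  intro lr _
  norm_num [PySem.List.pySetD, PySem.List.pySet?, PySem.List.pyIdx?, PySem.Dict.getD,
    PySem.Dict.insert, PySem.Dict.get?]
  rfl

theorem length_pvAccumulate (s : Int) (l : List Int) : (pvAccumulate s l).length = l.length := by
  induction l generalizing s with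
  | nil => rfl
  | cons x l ih => simp [pvAccumulate, ih]

theorem length_pref (nums : List Int) (w : Int) : (pref nums w).length = nums.length + 1 := by
  simp [pref, length_pvAccumulate]

theorem acc_getD (s : Int) (l : List Int) (t : Nat) (ht : t ≤ l.length) :
    (s :: pvAccumulate s l).getD t 0 = s + (l.take t).sum := by
  induction l generalizing s t with
  | nil =>
    have : t = 0 := by simpa using ht
    subst this
    simp
  | cons x l ih =>
    cases t with
    | zero => simp
    | succ t =>
      simp only [pvAccumulate, List.getD_cons_succ, List.take_succ_cons, List.sum_cons]
      rw [ih (s + x) t (by simpa using ht)]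
      ring

theorem pref_getD (nums : List Int) (w : Int) (t : Nat) (ht : t ≤ nums.length) :
    (pref nums w).getD t 0
      = ((nums.take t).map (fun x => if x = w then (1 : Int) else 0)).sum := by
  rw [pref, acc_getD 0 _ t (by simpa using ht), ← List.map_take]
  simp

theorem pcFold_fst (l : List Int) (c : Int × Int × Int) :
    (l.foldl pcStep c).1 = c.1 + (l.map (fun x => if x = 1 then (1 : Int) else 0)).sum := by
  induction l generalizing c with
  | nil => simp
  | cons x l ih =>
    simp only [List.foldl_cons, List.map_cons, List.sum_cons]
    rw [ih]
    unfold pcStep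
    split_ifs with h1 h2 h3
    all_goals simp_all
    all_goals ring

theorem pcFold_snd_fst (l : List Int) (c : Int × Int × Int) :
    (l.foldl pcStep c).2.1 = c.2.1 + (l.map (fun x => if x = 2 then (1 : Int) else 0)).sum := by
  induction l generalizing c with
  | nil => simp
  | cons x l ih =>
    simp only [List.foldl_cons, List.map_cons, List.sum_cons]
    rw [ih]
    unfold pcStep
    split_ifs with h1 h2 h3
    all_goals simp_all
    all_goals ring

theorem pcFold_snd_snd (l : List Int) (c : Int × Int × Int) :
    (l.foldl pcStep c).2.2 = c.2.2 + (l.map (fun x => if x = 3 then (1 : Int) else 0)).sum := by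
  induction l generalizing c with
  | nil => simp
  | cons x l ih =>
    simp only [List.foldl_cons, List.map_cons, List.sum_cons]
    rw [ih]
    unfold pcStep
    split_ifs with h1 h2 h3
    all_goals simp_all
    all_goals ring

theorem query_resQ (nums : List Int) (lr : Int × Int)
    (h2 : PySem.Raise.InRange (nums.length + 1) lr.2)
    (h1 : PySem.Raise.InRange (nums.length + 1) (lr.1 - 1)) :
    query lr.1 lr.2 (pref nums 1) = (resQ nums lr).1 ∧
    query lr.1 lr.2 (pref nums 2) = (resQ nums lr).2.1 ∧
    query lr.1 lr.2 (pref nums 3) = (resQ nums lr).2.2 := by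
  have hL : ∀ w : Int, (pref nums w).length = nums.length + 1 := fun w => length_pref nums w
  have htr : resIdx (nums.length + 1) lr.2 ≤ nums.length := by
    have := resIdx_lt _ _ h2; omega
  have htl : resIdx (nums.length + 1) (lr.1 - 1) ≤ nums.length := by
    have := resIdx_lt _ _ h1; omega
  have hq : ∀ w : Int, query lr.1 lr.2 (pref nums w)
      = ((nums.take (resIdx (nums.length + 1) lr.2)).map
          (fun x => if x = w then (1 : Int) else 0)).sum
        - ((nums.take (resIdx (nums.length + 1) (lr.1 - 1))).map
          (fun x => if x = w then (1 : Int) else 0)).sum := by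
    intro w
    rw [query, pyGetD_resolve _ _ _ (by rw [hL]; exact h2),
      pyGetD_resolve _ _ _ (by rw [hL]; exact h1), hL,
      pref_getD _ _ _ htr, pref_getD _ _ _ htl]
  refine ⟨?_, ?_, ?_⟩
  · rw [hq 1]
    simp only [resQ, tadd, smul, pcAt, pcFold_fst]
    ring
  · rw [hq 2]
    simp only [resQ, tadd, smul, pcAt, pcFold_snd_fst]
    ring
  · rw [hq 3]
    simp only [resQ, tadd, smul, pcAt, pcFold_snd_snd]
    ring

-- ===== VERDICT (by name: the statement is the Claim_ definition above) =====
theorem solve_spec : Claim_equal_solve := by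
  intro inp _ hpre
  obtain ⟨nums, q⟩ := inp
  unfold Spec_solve
  rw [A_char, B_char _ _ hpre]
  apply List.map_congr_left
  intro lr hlr
  obtain ⟨h2, h1⟩ := hpre lr hlr
  obtain ⟨e1, e2, e3⟩ := query_resQ nums lr h2 h1
  rw [e1, e2, e3]
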